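-- pv_equiv track=rewrite | github.com/SirSmitty/Leetcode_Problems | 1678-goal-parser-interpretation/1678-goal-parser-interpretation.py | interpret
-- ===== SOURCE A (Python) =====
-- def interpret(command: str) -> str:
--     final_str = ""
--     for i in range(len(command)):
--         if(command[i] == "G"):
--             final_str += "G"
--         if(command[i : i+2] == "()"):
--             final_str += "o"
--         if(command[i : i+4] == "(al)"):
--             final_str += "al"
--     return final_str
-- ===== SOURCE B (Python) =====
-- def interpret(command: str) -> str:
--     # Single left-to-right token scan: consume a whole token ("G", "()", "(al)")
--     # and jump past it, instead of testing a slice at every index.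
--     out = []
--     i = 0
--     n = len(command)
--     while i < n:
--         c = command[i]
--         if c == 'G':
--             out.append('G')
--             i += 1
--         elif c == '(' and i + 1 < n and command[i + 1] == ')':
--             out.append('o')
--             i += 2
--         elif c == '(' and command.startswith('(al)', i):
--             out.append('al')
--             i += 4
--         else:
--             i += 1
--     return ''.join(out)
-- ===== Notes on version B (the rewrite author's own statement) =====
-- stated objective: faster
-- what changed: Replaces A's per-index scheme (test a fresh slice at every single index and accumulate by repeated string concatenation) with a token-consuming cursor scan that jumps past each matched token and joins the pieces once at the end.
import Mathlib
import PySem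

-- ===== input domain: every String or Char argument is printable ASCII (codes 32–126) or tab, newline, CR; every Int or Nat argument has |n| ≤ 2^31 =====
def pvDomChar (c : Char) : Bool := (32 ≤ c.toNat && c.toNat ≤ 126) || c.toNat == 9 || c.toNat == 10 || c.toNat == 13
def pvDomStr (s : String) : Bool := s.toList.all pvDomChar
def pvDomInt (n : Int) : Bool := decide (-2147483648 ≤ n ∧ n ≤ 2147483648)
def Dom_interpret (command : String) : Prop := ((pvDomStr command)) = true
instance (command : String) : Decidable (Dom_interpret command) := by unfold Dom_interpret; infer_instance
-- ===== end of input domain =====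

-- B replaces A's per-index slice tests with a token-consuming scan; same return value, no side effects.

-- ===== PORT A =====
-- for i in range(len(command)): three independent if-tests on command[i], command[i:i+2], command[i:i+4]
def interpret (command : String) : String :=
  let cs := command.toList
  String.ofList <|
    (PySem.List.pyRange 0 cs.length 1).foldl (fun acc i =>
      let acc := if PySem.List.pyGet? cs i = some 'G' then acc ++ ['G'] else acc
      let acc := if PySem.List.slice cs (some i) (some (i + 2)) = ['(', ')'] then acc ++ ['o'] else acc
      if PySem.List.slice cs (some i) (some (i + 4)) = ['(', 'a', 'l', ')'] then acc ++ ['a', 'l'] else acc) []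

-- ===== PORT B =====
-- the while-loop cursor of Source B: the unscanned suffix is the state; each step consumes one token (or one junk char)
def interpretAltGo : List Char → List Char
  | [] => []
  | 'G' :: rest => 'G' :: interpretAltGo rest
  | '(' :: ')' :: rest => 'o' :: interpretAltGo rest
  | '(' :: 'a' :: 'l' :: ')' :: rest => 'a' :: 'l' :: interpretAltGo rest
  | _ :: rest => interpretAltGo rest

def interpret_alt (command : String) : String :=
  String.ofList (interpretAltGo command.toList)

-- ===== PRECONDITION & SPEC =====
def Spec_interpret (command : String) (out : String) : Prop := out = interpret_alt command
instance (command : String) (out : String) : Decidable (Spec_interpret command out) := by unfold Spec_interpret; infer_instance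

-- ===== CLAIM (what is proved, stated in full; the proofs are below) =====
def Claim_equal_interpret : Prop := ∀ (command : String), Dom_interpret command → Spec_interpret command (interpret command)

-- ===== LEMMAS AND PROOFS =====

-- what A emits at one index, as a function of the suffix starting there
def emitL (xs : List Char) : List Char :=
  (if xs.head? = some 'G' then ['G'] else []) ++
  (if xs.take 2 = ['(', ')'] then ['o'] else []) ++
  (if xs.take 4 = ['(', 'a', 'l', ')'] then ['a', 'l'] else [])

lemma emit_suffix (cs : List Char) :
    (fun acc (i : Int) =>
      let acc := if PySem.List.pyGet? cs i = some 'G' then acc ++ ['G'] else acc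
      let acc := if PySem.List.slice cs (some i) (some (i + 2)) = ['(', ')'] then acc ++ ['o'] else acc
      if PySem.List.slice cs (some i) (some (i + 4)) = ['(', 'a', 'l', ')'] then acc ++ ['a', 'l'] else acc)
    = fun acc i => acc ++ ((if PySem.List.pyGet? cs i = some 'G' then ['G'] else []) ++
        (if PySem.List.slice cs (some i) (some (i + 2)) = ['(', ')'] then ['o'] else []) ++
        (if PySem.List.slice cs (some i) (some (i + 4)) = ['(', 'a', 'l', ')'] then ['a', 'l'] else [])) := by
  funext acc i
  dsimp only []
  split_ifs <;> simp

lemma emit_at_nat (cs : List Char) (k : Nat) :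
    (if PySem.List.pyGet? cs (k : Int) = some 'G' then (['G'] : List Char) else []) ++
    (if PySem.List.slice cs (some (k : Int)) (some ((k : Int) + 2)) = ['(', ')'] then ['o'] else []) ++
    (if PySem.List.slice cs (some (k : Int)) (some ((k : Int) + 4)) = ['(', 'a', 'l', ')'] then ['a', 'l'] else [])
    = emitL (cs.drop k) := by
  have h2 : ((k : Int) + 2) = (((k + 2 : Nat)) : Int) := by push_cast; ring
  have h4 : ((k : Int) + 4) = (((k + 4 : Nat)) : Int) := by push_cast; ring
  rw [h2, h4, PySem.List.slice_natCast, PySem.List.slice_natCast, PySem.List.pyGet?_natCast]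
  simp [emitL, List.head?_drop]

lemma flat_cons (c : Char) (cs : List Char) :
    (List.range (c :: cs).length).flatMap (fun k => emitL ((c :: cs).drop k))
    = emitL (c :: cs) ++ (List.range cs.length).flatMap (fun k => emitL (cs.drop k)) := by
  rw [List.length_cons, List.range_succ_eq_map]
  simp [List.flatMap_map]

lemma sum_emit (cs : List Char) :
    (List.range cs.length).flatMap (fun k => emitL (cs.drop k)) = interpretAltGo cs := by
  induction cs using interpretAltGo.induct with
  | case1 => simp [interpretAltGo]
  | case2 rest ih =>
      rw [flat_cons, ih]
      simp [emitL, interpretAltGo]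
  | case3 rest ih =>
      rw [flat_cons, flat_cons, ih]
      simp [emitL, interpretAltGo]
  | case4 rest ih =>
      rw [flat_cons, flat_cons, flat_cons, flat_cons, ih]
      simp [emitL, interpretAltGo]
  | case5 c rest h1 h2 h3 ih =>
      have hg : ¬ ((c :: rest).head? = some 'G') := by simpa using h1
      have h2' : (c :: rest).take 2 = ['(', ')'] → False := by
        intro h
        cases rest with
        | nil => simp at h
        | cons b t =>
          simp at h
          exact h2 t h.1 (by rw [h.2])
      have h3' : (c :: rest).take 4 = ['(', 'a', 'l', ')'] → False := by
        intro h
        cases rest with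
        | nil => simp at h
        | cons b t =>
          cases t with
          | nil => simp at h
          | cons d u =>
            cases u with
            | nil => simp at h
            | cons e v =>
              simp at h
              exact h3 v h.1 (by rw [h.2.1, h.2.2.1, h.2.2.2])
      have he : emitL (c :: rest) = [] := by
        unfold emitL
        rw [if_neg hg, if_neg h2', if_neg h3']
        rfl
      rw [flat_cons, ih, he]
      conv_rhs => rw [interpretAltGo.eq_def]
      split <;> simp_all

lemma interpret_toList (cs : List Char) :
    ((PySem.List.pyRange 0 cs.length 1).foldl (fun acc i =>
      let acc := if PySem.List.pyGet? cs i = some 'G' then acc ++ ['G'] else acc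
      let acc := if PySem.List.slice cs (some i) (some (i + 2)) = ['(', ')'] then acc ++ ['o'] else acc
      if PySem.List.slice cs (some i) (some (i + 4)) = ['(', 'a', 'l', ')'] then acc ++ ['a', 'l'] else acc) [])
    = interpretAltGo cs := by
  rw [emit_suffix, PySem.List.foldl_append_eq_flatMap, PySem.List.pyRange_one]
  simp only [sub_zero, Int.toNat_natCast, zero_add, List.flatMap_map, List.nil_append]
  simp only [emit_at_nat]
  exact sum_emit cs

-- ===== VERDICT (by name: the statement is the Claim_ definition above) =====
theorem interpret_spec : Claim_equal_interpret := by
  intro command _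
  unfold Spec_interpret interpret interpret_alt
  simp only [interpret_toList]
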